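-- pv_equiv track=rewrite | github.com/aamelegy/Problems | acmicpc/level1/phase1/SRM240DivII250.py | canPronounce
-- ===== SOURCE A (Python) =====
-- def canPronounce(words):
--     vowel={'a','e','i','o','u'}
--     for word in words:
--         orig=word
--         word=word.lower()
--         cons_count=0
--         vowel_count=0
--         last_ch=''
--         for ch in word:
--             if ch not in vowel:
--                 cons_count+=1
--                 if cons_count==3:
--                     return orig
--             else:
--                 cons_count=0
--             if ch in vowel:
--                 vowel_count+=1
--                 if vowel_count==2 :
--                     if  ch!=last_ch:
--                         return orig
--                     else:
--                         vowel_count=1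
--             else:
--                 vowel_count=0
--             last_ch=ch
--     return ""
-- ===== SOURCE B (Python) =====
-- def canPronounce(words):
--     vowels = set('aeiou')
--     def bad(w):
--         l = w.lower()
--         triple = any(a not in vowels and b not in vowels and c not in vowels
--                      for a, b, c in zip(l, l[1:], l[2:]))
--         pair = any(a in vowels and b in vowels and a != b
--                    for a, b in zip(l, l[1:]))
--         return triple or pair
--     for w in words:
--         if bad(w):
--             return w
--     return ""
-- ===== Notes on version B (the rewrite author's own statement) =====
-- stated objective: idiomatic
-- what changed: replaces A's single stateful scan with mutable run counters and last-char state by two independent stateless window predicates (any over length-3 windows of non-vowels, and over adjacent distinct vowel pairs) applied to each word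
import Mathlib
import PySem

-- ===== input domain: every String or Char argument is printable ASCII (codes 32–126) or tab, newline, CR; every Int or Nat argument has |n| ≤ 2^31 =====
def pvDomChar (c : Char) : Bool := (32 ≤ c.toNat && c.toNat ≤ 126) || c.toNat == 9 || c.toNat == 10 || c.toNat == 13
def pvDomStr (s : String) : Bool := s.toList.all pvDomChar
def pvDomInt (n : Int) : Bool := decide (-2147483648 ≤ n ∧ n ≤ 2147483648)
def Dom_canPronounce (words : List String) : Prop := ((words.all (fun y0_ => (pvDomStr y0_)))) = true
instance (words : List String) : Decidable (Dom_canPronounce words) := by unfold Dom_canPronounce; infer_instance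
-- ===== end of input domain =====

-- B replaces A's stateful single-pass scan (run counters + last-char state) by two
-- independent stateless window predicates per word; objective: idiomatic, same cost.


-- ===== PORT A =====
-- vowel = {'a','e','i','o','u'}
def vowelA : List Char := ['a', 'e', 'i', 'o', 'u']

-- the inner 'for ch in word' loop of A; returns true exactly when A returns orig
def loopA : List Char → Int → Int → String → Bool
  | [], _, _, _ => false
  | ch :: rest, cons_count, vowel_count, last_ch =>
    if ¬ vowelA.contains ch then
      -- cons_count += 1; if cons_count == 3: return orig
      let c' := cons_count + 1
      if c' = 3 then true
      else
        -- 'ch in vowel' is false here, so vowel_count = 0; last_ch = ch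
        loopA rest c' 0 (String.ofList [ch])
    else
      -- cons_count = 0; vowel_count += 1
      let v' := vowel_count + 1
      if v' = 2 then
        if String.ofList [ch] ≠ last_ch then true
        else loopA rest 0 1 (String.ofList [ch])
      else loopA rest 0 v' (String.ofList [ch])

def canPronounce (words : List String) : String :=
  match words with
  | [] => ""
  | w :: rest =>
    if loopA (PySem.Str.lower w).toList 0 0 "" then w else canPronounce rest

-- ===== PORT B =====
def isVowel (c : Char) : Bool := c == 'a' || c == 'e' || c == 'i' || c == 'o' || c == 'u'

-- any(a∉V and b∉V and c∉V for a,b,c in zip(l, l[1:], l[2:]))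
def badTriple : List Char → Bool
  | a :: b :: c :: r => (!isVowel a && !isVowel b && !isVowel c) || badTriple (b :: c :: r)
  | _ => false

-- any(a∈V and b∈V and a≠b for a,b in zip(l, l[1:]))
def badPair : List Char → Bool
  | a :: b :: r => (isVowel a && isVowel b && a != b) || badPair (b :: r)
  | _ => false

def badWord (w : String) : Bool :=
  let l := (PySem.Str.lower w).toList
  badTriple l || badPair l

def canPronounce_alt (words : List String) : String :=
  match words with
  | [] => ""
  | w :: rest => if badWord w then w else canPronounce_alt rest

-- ===== PRECONDITION & SPEC =====
def Spec_canPronounce (words : List String) (out : String) : Prop := out = canPronounce_alt words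
instance (words : List String) (out : String) : Decidable (Spec_canPronounce words out) := by unfold Spec_canPronounce; infer_instance

-- ===== CLAIM (what is proved, stated in full; the proofs are below) =====
def Claim_equal_canPronounce : Prop := ∀ (words : List String), Dom_canPronounce words → Spec_canPronounce words (canPronounce words)

-- ===== LEMMAS AND PROOFS =====

theorem contains_vowelA (c : Char) : vowelA.contains c = isVowel c := by
  show (['a', 'e', 'i', 'o', 'u'] : List Char).contains c = _
  simp [isVowel, Bool.or_assoc, beq_eq_decide]

-- one unfolding step of A's character loop, phrased through isVowel
theorem loopA_cons (ch : Char) (rest : List Char) (c v : Int) (last : String) :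
    loopA (ch :: rest) c v last =
      if isVowel ch then
        (if v + 1 = 2 then
           (if String.ofList [ch] ≠ last then true else loopA rest 0 1 (String.ofList [ch]))
         else loopA rest 0 (v + 1) (String.ofList [ch]))
      else (if c + 1 = 3 then true else loopA rest (c + 1) 0 (String.ofList [ch])) := by
  rw [loopA, contains_vowelA]
  by_cases h : isVowel ch = true <;> simp [h]

theorem ofList_singleton_eq (a b : Char) : (String.ofList [a] = String.ofList [b]) ↔ a = b := by
  constructor
  · intro h
    have := congrArg String.toList h
    simpa using this
  · intro h; rw [h]

-- badPair ignores a leading non-vowel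
theorem badPair_cons_nonvowel {a : Char} (h : isVowel a = false) (l : List Char) :
    badPair (a :: l) = badPair l := by
  cases l with
  | nil => simp [badPair]
  | cons b r => simp [badPair, h]

-- badPair ignores a leading vowel followed by a non-vowel or by the same vowel
theorem badPair_cons2 {x a : Char} (l : List Char)
    (h : isVowel a = false ∨ x = a) :
    badPair (x :: a :: l) = badPair (a :: l) := by
  rcases h with h | h
  · simp [badPair, h]
  · subst h; simp [badPair]

-- badTriple only looks at the vowel-pattern of its argument
theorem badTriple_congr : ∀ (l₁ l₂ : List Char),
    l₁.map isVowel = l₂.map isVowel → badTriple l₁ = badTriple l₂ := by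
  intro l₁
  induction l₁ with
  | nil => intro l₂ h; cases l₂ <;> simp_all [badTriple]
  | cons a t ih =>
    intro l₂ h
    cases l₂ with
    | nil => simp at h
    | cons a' t' =>
      simp only [List.map_cons, List.cons.injEq] at h
      obtain ⟨ha, ht⟩ := h
      cases t with
      | nil => cases t' <;> simp_all [badTriple]
      | cons b u =>
        cases t' with
        | nil => simp at ht
        | cons b' u' =>
          simp only [List.map_cons, List.cons.injEq] at ht
          obtain ⟨hb, hu⟩ := ht
          cases u with
          | nil => cases u' <;> simp_all [badTriple]
          | cons c v =>
            cases u' with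
            | nil => simp at hu
            | cons c' v' =>
              simp only [List.map_cons, List.cons.injEq] at hu
              obtain ⟨hc, _⟩ := hu
              have := ih (b' :: c' :: v') (by simp_all)
              simp [badTriple, ha, hb, hc, this]

-- a leading vowel kills every window that could use the ≤ 2 pending non-vowels
theorem badTriple_vowel_cut {ch : Char} (h : isVowel ch = true) :
    ∀ (n : Nat), n ≤ 2 → ∀ (l : List Char),
    badTriple (List.replicate n 'z' ++ ch :: l) = badTriple l := by
  intro n hn l
  interval_cases n
  · cases l with
    | nil => simp [badTriple]
    | cons b r =>
      cases r with
      | nil => simp [badTriple]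
      | cons c v => simp [badTriple, h]
  · cases l with
    | nil => simp [badTriple]
    | cons b r =>
      cases r with
      | nil => simp [badTriple, h]
      | cons c v => simp [badTriple, h]
  · cases l with
    | nil => simp [badTriple, h]
    | cons b r =>
      cases r with
      | nil => simp [badTriple, h]
      | cons c v => simp [badTriple, h]

-- a pending non-vowel can be folded into the replicate prefix
theorem badTriple_shift {ch : Char} (h : isVowel ch = false) (n : Nat) (l : List Char) :
    badTriple (List.replicate n 'z' ++ ch :: l) = badTriple (List.replicate (n + 1) 'z' ++ l) := by
  apply badTriple_congr
  have hz : isVowel 'z' = false := by decide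
  simp [List.map_append, List.map_replicate, hz, h, List.replicate_succ']

theorem badTriple_two_z {ch : Char} (h : isVowel ch = false) (l : List Char) :
    badTriple (List.replicate 2 'z' ++ ch :: l) = true := by
  have hz : isVowel 'z' = false := by decide
  simp [List.replicate, badTriple, hz, h]

-- MAIN INVARIANT: A's scan from a reachable state equals B's two window predicates,
-- with the pending non-vowel run as a replicate prefix and the pending vowel prepended.
theorem loopA_eq : ∀ (cs : List Char) (n : Nat), n ≤ 2 →
    (∀ last : String, loopA cs (n : Int) 0 last
        = (badTriple (List.replicate n 'z' ++ cs) || badPair cs)) ∧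
    (∀ x : Char, isVowel x = true →
      loopA cs (n : Int) 1 (String.ofList [x])
        = (badTriple (List.replicate n 'z' ++ cs) || badPair (x :: cs))) := by
  intro cs
  induction cs with
  | nil =>
    intro n hn
    constructor <;> intros <;>
      · rw [loopA]
        interval_cases n <;> simp [badTriple, badPair, List.replicate]
  | cons ch rest ih =>
    intro n hn
    by_cases hv : isVowel ch = true
    · -- ch is a vowel: cons run resets; a second adjacent vowel fires iff distinct
      have hcut := badTriple_vowel_cut hv n hn rest
      have hrec := (ih 0 (by omega)).2 ch hv
      simp only [Nat.cast_zero, List.replicate, List.nil_append] at hrec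
      constructor
      · intro last
        rw [loopA_cons, if_pos hv, if_neg (by norm_num),
          (by norm_num : (0:Int) + 1 = 1), hrec, hcut]
      · intro x hx
        rw [loopA_cons, if_pos hv, if_pos (by norm_num)]
        by_cases hne : String.ofList [ch] ≠ String.ofList [x]
        · rw [if_pos hne]
          have hxc : x ≠ ch := fun e => hne (by rw [e])
          have : badPair (x :: ch :: rest) = true := by
            simp [badPair, hx, hv]
            exact Or.inl hxc
          simp [this]
        · rw [if_neg hne, hrec, hcut,
            badPair_cons2 rest (Or.inr ((ofList_singleton_eq ch x).1 (not_not.1 hne)).symm)]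
    · -- ch is not a vowel: the cons run grows (returning at 3); vowel state resets
      have hv' : isVowel ch = false := by simpa using hv
      have hshift := badTriple_shift hv' n rest
      have hpair := badPair_cons_nonvowel hv' rest
      by_cases h2 : n = 2
      · subst h2
        have htrue := badTriple_two_z hv' rest
        constructor
        · intro last
          rw [loopA_cons, if_neg (by simp [hv']), if_pos (by norm_num), htrue]
          simp
        · intro x hx
          rw [loopA_cons, if_neg (by simp [hv']), if_pos (by norm_num), htrue]
          simp
      · have hn1 : n + 1 ≤ 2 := by omega
        have hrec := (ih (n + 1) hn1).1 (String.ofList [ch])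
        have hcast : (n : Int) + 1 = ((n + 1 : Nat) : Int) := by push_cast; ring
        have hne3 : ¬ ((n : Int) + 1 = 3) := by omega
        constructor
        · intro last
          rw [loopA_cons, if_neg (by simp [hv']), if_neg hne3, hcast, hrec, hshift, hpair]
        · intro x hx
          rw [loopA_cons, if_neg (by simp [hv']), if_neg hne3, hcast, hrec, hshift,
            badPair_cons2 rest (Or.inl hv'), hpair]

theorem loopA_eq_badWord (w : String) :
    loopA (PySem.Str.lower w).toList 0 0 "" = badWord w := by
  have := (loopA_eq (PySem.Str.lower w).toList 0 (by omega)).1 ""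
  simpa [badWord] using this

-- ===== VERDICT (by name: the statement is the Claim_ definition above) =====
theorem canPronounce_spec : Claim_equal_canPronounce := by
  intro words hd
  unfold Spec_canPronounce
  induction words with
  | nil => rfl
  | cons w rest ih =>
    simp only [canPronounce, canPronounce_alt, loopA_eq_badWord]
    split
    · rfl
    · exact ih (by simp_all [Dom_canPronounce])
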